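-- pv_equiv track=rewrite | github.com/bensahar7/Clinic | Project.py | creat_relavent_dic
-- ===== SOURCE A (Python) =====
-- def creat_relavent_dic(x,month):
--     dtreat = {}
--     date = []
--     dprice = {}
--     dclinic = {}
--     dannual = {}
--
--     for line in x:
--         fields = line.strip().split(',')
--         month_field = fields[0]
--         treat = fields[1]
--         loc = fields[2]
--         mm = month_field.split()
--         date = mm[0]
--         if month in date:
--             dtreat[treat] = dtreat.get(treat, 0) + 1
--
--     for line in x:
--         fields = line.strip().split(',')
--         month_field = fields[0]
--         mm = month_field.split()
--         price = fields[2]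
--         clinic = fields[3]
--         date = mm[0]
--         if month in date:
--             dclinic[clinic] = dclinic.get(clinic, 0) + 1
--             dprice[clinic] = price
--
--     return dtreat, dprice, dclinic, dannual
-- ===== SOURCE B (Python) =====
-- def creat_relavent_dic(x, month):
--     # Single pass: build all three dicts in one loop instead of A's two scans.
--     dtreat = {}
--     dprice = {}
--     dclinic = {}
--     for line in x:
--         fields = line.strip().split(',')
--         date = fields[0].split()[0]
--         treat, price, clinic = fields[1], fields[2], fields[3]
--         if month in date:
--             dtreat[treat] = dtreat.get(treat, 0) + 1
--             dclinic[clinic] = dclinic.get(clinic, 0) + 1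
--             dprice[clinic] = price
--     return dtreat, dprice, dclinic, {}
-- ===== Notes on version B (the rewrite author's own statement) =====
-- stated objective: simpler
-- what changed: A scans the input twice (one loop for treatment counts, a second for clinic counts and prices); B does one pass that strips/splits each line once and updates all three dicts together, returning the same 4-tuple with an empty dannual.
import Mathlib
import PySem

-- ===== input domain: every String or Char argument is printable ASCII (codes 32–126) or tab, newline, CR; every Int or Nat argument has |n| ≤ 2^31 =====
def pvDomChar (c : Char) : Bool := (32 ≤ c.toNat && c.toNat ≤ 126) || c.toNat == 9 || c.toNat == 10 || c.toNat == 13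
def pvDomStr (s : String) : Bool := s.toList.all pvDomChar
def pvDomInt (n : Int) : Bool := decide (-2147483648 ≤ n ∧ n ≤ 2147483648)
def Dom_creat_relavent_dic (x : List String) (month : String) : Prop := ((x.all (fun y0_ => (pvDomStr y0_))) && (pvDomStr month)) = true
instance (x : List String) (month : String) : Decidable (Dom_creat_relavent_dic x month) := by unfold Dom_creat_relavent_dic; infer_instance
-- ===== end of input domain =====

-- B changes A's two sequential scans (parsing every line twice) into one pass that parses each
-- line once and updates all three dicts together; same return value, dannual stays {}.
-- ===== PORT A =====
-- line.strip().split(','): split? is always `some` since the separator "," is nonempty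
def pvFields (line : String) : List String := (PySem.Str.split? (PySem.Str.strip line) ",").getD []
-- first loop of A: count treatments for lines whose date contains month
def pvStepTreat (month : String) (dtreat : PySem.Dict String Int) (line : String) : PySem.Dict String Int :=
  let fields := pvFields line
  match PySem.List.pyGet? fields 0, PySem.List.pyGet? fields 1, PySem.List.pyGet? fields 2 with
  | some month_field, some treat, some _loc =>
    let mm := PySem.Str.split₀ month_field
    match PySem.List.pyGet? mm 0 with
    | some date =>
      if PySem.Str.isIn month date then dtreat.insert treat (dtreat.getD treat 0 + 1) else dtreat
    | none => dtreat   -- IndexError in Python; excluded by Pre_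
  | _, _, _ => dtreat  -- IndexError in Python; excluded by Pre_

-- second loop of A: count clinics and record price per clinic (state = (dprice, dclinic))
def pvStepClinic (month : String) (st : PySem.Dict String String × PySem.Dict String Int) (line : String) :
    PySem.Dict String String × PySem.Dict String Int :=
  let fields := pvFields line
  match PySem.List.pyGet? fields 0, PySem.List.pyGet? fields 2, PySem.List.pyGet? fields 3 with
  | some month_field, some price, some clinic =>
    let mm := PySem.Str.split₀ month_field
    match PySem.List.pyGet? mm 0 with
    | some date =>
      if PySem.Str.isIn month date then
        ((st.1).insert clinic price, (st.2).insert clinic ((st.2).getD clinic 0 + 1))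
      else st
    | none => st   -- IndexError in Python; excluded by Pre_
  | _, _, _ => st  -- IndexError in Python; excluded by Pre_

def creat_relavent_dic (x : List String) (month : String) : (List (String × Int)) × (List (String × String)) × (List (String × Int)) × (List (String × Int)) :=
  let dtreat := x.foldl (pvStepTreat month) PySem.Dict.empty
  let st := x.foldl (pvStepClinic month) (PySem.Dict.empty, PySem.Dict.empty)
  (dtreat.items, st.1.items, st.2.items, ([] : List (String × Int)))

-- ===== PORT B =====
-- single pass: state = (dtreat, dprice, dclinic), one strip/split per line
def pvStepAll (month : String)
    (st : PySem.Dict String Int × PySem.Dict String String × PySem.Dict String Int) (line : String) :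
    PySem.Dict String Int × PySem.Dict String String × PySem.Dict String Int :=
  let fields := pvFields line
  match PySem.List.pyGet? fields 0, PySem.List.pyGet? fields 1, PySem.List.pyGet? fields 2, PySem.List.pyGet? fields 3 with
  | some f0, some treat, some price, some clinic =>
    match PySem.List.pyGet? (PySem.Str.split₀ f0) 0 with
    | some date =>
      if PySem.Str.isIn month date then
        ((st.1).insert treat ((st.1).getD treat 0 + 1),
         (st.2.1).insert clinic price,
         (st.2.2).insert clinic ((st.2.2).getD clinic 0 + 1))
      else st
    | none => st   -- IndexError in Python; excluded by Pre_
  | _, _, _, _ => st  -- IndexError in Python; excluded by Pre_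

def creat_relavent_dic_alt (x : List String) (month : String) : (List (String × Int)) × (List (String × String)) × (List (String × Int)) × (List (String × Int)) :=
  let st := x.foldl (pvStepAll month) (PySem.Dict.empty, PySem.Dict.empty, PySem.Dict.empty)
  (st.1.items, st.2.1.items, st.2.2.items, ([] : List (String × Int)))

-- ===== PRECONDITION & SPEC =====
-- Pre_ excludes exactly the lines on which Python A raises IndexError: a line whose
-- comma-split has fewer than 4 fields, or whose first field is all whitespace (empty .split()).
def Pre_creat_relavent_dic (x : List String) (month : String) : Prop :=
  ∀ line ∈ x,
    4 ≤ (pvFields line).length ∧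
    PySem.Str.split₀ ((pvFields line).getD 0 "") ≠ []
instance (x : List String) (month : String) : Decidable (Pre_creat_relavent_dic x month) := by
  unfold Pre_creat_relavent_dic; infer_instance
def pvWitness_creat_relavent_dic : List String × String :=
  (["1/2020 x,clean,100,cityA", "2/2020 y,fill,50,cityB"], "2020")

def Spec_creat_relavent_dic (x : List String) (month : String) (out : (List (String × Int)) × (List (String × String)) × (List (String × Int)) × (List (String × Int))) : Prop := out = creat_relavent_dic_alt x month
instance (x : List String) (month : String) (out : (List (String × Int)) × (List (String × String)) × (List (String × Int)) × (List (String × Int))) : Decidable (Spec_creat_relavent_dic x month out) := by unfold Spec_creat_relavent_dic; infer_instance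

-- ===== CLAIM (what is proved, stated in full; the proofs are below) =====
def Claim_equal_creat_relavent_dic : Prop := ∀ (x : List String) (month : String), Dom_creat_relavent_dic x month → Pre_creat_relavent_dic x month → Spec_creat_relavent_dic x month (creat_relavent_dic x month)

-- ===== LEMMAS AND PROOFS =====

-- On a line admitted by Pre_, the combined step acts componentwise as A's two steps.
theorem pvStepAll_eq (month line : String)
    (h4 : 4 ≤ (pvFields line).length)
    (hmm : PySem.Str.split₀ ((pvFields line).getD 0 "") ≠ [])
    (d1 : PySem.Dict String Int) (d2 : PySem.Dict String String) (d3 : PySem.Dict String Int) :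
    pvStepAll month (d1, d2, d3) line =
      (pvStepTreat month d1 line, pvStepClinic month (d2, d3) line) := by
  obtain ⟨a, b, c, d, rest, hf⟩ :
      ∃ a b c d rest, pvFields line = a :: b :: c :: d :: rest := by
    match hfs : pvFields line with
    | a :: b :: c :: d :: rest => exact ⟨a, b, c, d, rest, rfl⟩
    | [] | [_] | [_, _] | [_, _, _] => simp [hfs] at h4
  rw [hf] at hmm
  obtain ⟨e, mrest, hm⟩ : ∃ e mrest, PySem.Str.split₀ a = e :: mrest := by
    match hms : PySem.Str.split₀ a with
    | e :: mrest => exact ⟨e, mrest, rfl⟩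
    | [] => simp [hms] at hmm
  have h0 : PySem.List.pyGet? (a :: b :: c :: d :: rest) 0 = some a := by
    simpa using PySem.List.pyGet?_natCast (a :: b :: c :: d :: rest) 0
  have h1 : PySem.List.pyGet? (a :: b :: c :: d :: rest) 1 = some b := by
    simpa using PySem.List.pyGet?_natCast (a :: b :: c :: d :: rest) 1
  have h2 : PySem.List.pyGet? (a :: b :: c :: d :: rest) 2 = some c := by
    simpa using PySem.List.pyGet?_natCast (a :: b :: c :: d :: rest) 2
  have h3 : PySem.List.pyGet? (a :: b :: c :: d :: rest) 3 = some d := by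
    simpa using PySem.List.pyGet?_natCast (a :: b :: c :: d :: rest) 3
  have he : PySem.List.pyGet? (e :: mrest) 0 = some e := by
    simpa using PySem.List.pyGet?_natCast (e :: mrest) 0
  simp only [pvStepAll, pvStepTreat, pvStepClinic, hf, hm, h0, h1, h2, h3, he]
  split <;> rfl

theorem pvFold_eq (month : String) (x : List String)
    (hpre : ∀ line ∈ x,
      4 ≤ (pvFields line).length ∧
      PySem.Str.split₀ ((pvFields line).getD 0 "") ≠ []) :
    ∀ (d1 : PySem.Dict String Int) (d2 : PySem.Dict String String) (d3 : PySem.Dict String Int),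
      x.foldl (pvStepAll month) (d1, d2, d3) =
        (x.foldl (pvStepTreat month) d1, x.foldl (pvStepClinic month) (d2, d3)) := by
  induction x with
  | nil => intro d1 d2 d3; rfl
  | cons line tl ih =>
    intro d1 d2 d3
    obtain ⟨h4, hmm⟩ := hpre line (by simp)
    rw [List.foldl_cons, List.foldl_cons, List.foldl_cons,
        pvStepAll_eq month line h4 hmm d1 d2 d3]
    cases hp : pvStepClinic month (d2, d3) line with
    | mk p1 p2 =>
      exact ih (fun l hl => hpre l (List.mem_cons_of_mem _ hl)) _ p1 p2

-- ===== VERDICT (by name: the statement is the Claim_ definition above) =====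
theorem creat_relavent_dic_spec : Claim_equal_creat_relavent_dic := by
  intro x month _ hpre
  unfold Spec_creat_relavent_dic creat_relavent_dic creat_relavent_dic_alt
  rw [pvFold_eq month x hpre]
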